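-- pv_equiv track=rewrite | github.com/NoyeArk/Mixed-Projects | MCGS/改成一次拓展一个结点/main.py | coordinate_transform_pixel2map
-- ===== SOURCE A (Python) =====
-- def coordinate_transform_pixel2map(x, y):
--     for i in range(11):
--         for j in range(11):
--             if x <= 100 + 68 * j + 34 * i + 32 \
--                     and x > 100 + 68 * j + 34 * i - 32 \
--                     and y <= 90 + 59 * i + 32 \
--                     and y > 90 + 59 * i - 32:
--                 return i, j
--     return None, None
-- ===== SOURCE B (Python) =====
-- def coordinate_transform_pixel2map(x, y):
--     for i in range(11):
--         if 90 + 59 * i - 32 < y <= 90 + 59 * i + 32: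
--             # spacing 68 > band width 64, so at most one j can match for this i
--             j = (x - 65 - 34 * i) // 68
--             if 0 <= j <= 10 \
--                     and x <= 100 + 68 * j + 34 * i + 32 \
--                     and x > 100 + 68 * j + 34 * i - 32:
--                 return i, j
--     return None, None
-- ===== Notes on version B (the rewrite author's own statement) =====
-- stated objective: faster
-- what changed: The inner scan over j disappears: for each i, after the y-band test the unique candidate j is computed by one floor division and verified against the exact original inequalities.
import Mathlib
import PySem

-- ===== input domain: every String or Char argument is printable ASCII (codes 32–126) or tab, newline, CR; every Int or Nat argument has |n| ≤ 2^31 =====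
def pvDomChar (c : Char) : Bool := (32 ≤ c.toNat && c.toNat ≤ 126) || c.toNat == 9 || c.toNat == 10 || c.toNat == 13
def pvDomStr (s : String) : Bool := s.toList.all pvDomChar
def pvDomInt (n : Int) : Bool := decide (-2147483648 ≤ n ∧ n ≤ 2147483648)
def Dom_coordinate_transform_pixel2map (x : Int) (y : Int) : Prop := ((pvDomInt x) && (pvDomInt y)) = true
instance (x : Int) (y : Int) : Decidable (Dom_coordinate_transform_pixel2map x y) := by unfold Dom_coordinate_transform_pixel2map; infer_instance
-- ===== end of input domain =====

-- B replaces A's inner scan over j by computing the single candidate j with one floor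
-- division per i and re-checking the exact inequalities (11 instead of 121 iterations).

-- ===== PORT A =====
-- inner 'for j in ...: if ...: return i, j'
def pvLoopJ (x y i : Int) : List Int → Option (Int × Int)
  | [] => none
  | j :: js =>
    if x ≤ 100 + 68 * j + 34 * i + 32 ∧ x > 100 + 68 * j + 34 * i - 32 ∧
       y ≤ 90 + 59 * i + 32 ∧ y > 90 + 59 * i - 32 then some (i, j)
    else pvLoopJ x y i js

-- outer 'for i in ...' with early return from the inner loop
def pvLoopI (x y : Int) : List Int → Option (Int × Int)
  | [] => none
  | i :: is =>
    match pvLoopJ x y i (PySem.List.pyRange 0 11 1) with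
    | some p => some p
    | none => pvLoopI x y is

def coordinate_transform_pixel2map (x : Int) (y : Int) : Option Int × Option Int :=
  match pvLoopI x y (PySem.List.pyRange 0 11 1) with
  | some (i, j) => (some i, some j)
  | none => (none, none)

-- ===== PORT B =====
-- Source B's single loop over i: y-band test, then the arithmetic candidate j, verified
def pvLoopIAlt (x y : Int) : List Int → Option (Int × Int)
  | [] => none
  | i :: is =>
    if 90 + 59 * i - 32 < y ∧ y ≤ 90 + 59 * i + 32 then
      let j := PySem.Int.floordiv (x - 65 - 34 * i) 68
      if 0 ≤ j ∧ j ≤ 10 ∧ x ≤ 100 + 68 * j + 34 * i + 32 ∧ x > 100 + 68 * j + 34 * i - 32 then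
        some (i, j)
      else pvLoopIAlt x y is
    else pvLoopIAlt x y is

def coordinate_transform_pixel2map_alt (x : Int) (y : Int) : Option Int × Option Int :=
  match pvLoopIAlt x y (PySem.List.pyRange 0 11 1) with
  | some (i, j) => (some i, some j)
  | none => (none, none)

-- ===== PRECONDITION & SPEC =====
def Spec_coordinate_transform_pixel2map (x : Int) (y : Int) (out : Option Int × Option Int) : Prop := out = coordinate_transform_pixel2map_alt x y
instance (x : Int) (y : Int) (out : Option Int × Option Int) : Decidable (Spec_coordinate_transform_pixel2map x y out) := by unfold Spec_coordinate_transform_pixel2map; infer_instance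

-- ===== CLAIM (what is proved, stated in full; the proofs are below) =====
def Claim_equal_coordinate_transform_pixel2map : Prop := ∀ (x : Int) (y : Int), Dom_coordinate_transform_pixel2map x y → Spec_coordinate_transform_pixel2map x y (coordinate_transform_pixel2map x y)

-- ===== LEMMAS AND PROOFS =====

-- A's inner scan returns none when no j in the list matches
theorem pvLoopJ_none (x y i : Int) (js : List Int)
    (h : ∀ j ∈ js, ¬(x ≤ 100 + 68 * j + 34 * i + 32 ∧ x > 100 + 68 * j + 34 * i - 32 ∧
        y ≤ 90 + 59 * i + 32 ∧ y > 90 + 59 * i - 32)) :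
    pvLoopJ x y i js = none := by
  induction js with
  | nil => rfl
  | cons j js ih =>
    rw [pvLoopJ.eq_2, if_neg (h j (List.mem_cons_self ..))]
    exact ih (fun j' hj' => h j' (List.mem_cons_of_mem _ hj'))

-- any j matching the x-window equals the unique q with 68*q ≤ x-65-34*i < 68*(q+1),
-- so if q matches and is in the list, the scan returns (i, q)
theorem pvLoopJ_some (x y i q : Int) (hq1 : 68 * q ≤ x - 65 - 34 * i)
    (hq2 : x - 65 - 34 * i < 68 * q + 68) (js : List Int) (hmem : q ∈ js)
    (hc : x ≤ 100 + 68 * q + 34 * i + 32 ∧ x > 100 + 68 * q + 34 * i - 32 ∧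
        y ≤ 90 + 59 * i + 32 ∧ y > 90 + 59 * i - 32) :
    pvLoopJ x y i js = some (i, q) := by
  induction js with
  | nil => cases hmem
  | cons j js ih =>
    rw [pvLoopJ.eq_2]
    by_cases hj : x ≤ 100 + 68 * j + 34 * i + 32 ∧ x > 100 + 68 * j + 34 * i - 32 ∧
        y ≤ 90 + 59 * i + 32 ∧ y > 90 + 59 * i - 32
    · obtain rfl : j = q := by omega
      rw [if_pos hj]
    · rw [if_neg hj]
      refine ih ?_
      rcases List.mem_cons.mp hmem with h | h
      · exfalso; exact hj ⟨by omega, by omega, by omega, by omega⟩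
      · exact h

-- the inner scan over range(11) equals B's arithmetic candidate test
theorem pvInner_eq (x y i : Int) :
    pvLoopJ x y i (PySem.List.pyRange 0 11 1) =
      (if (90 + 59 * i - 32 < y ∧ y ≤ 90 + 59 * i + 32) ∧
          (0 ≤ (x - 65 - 34 * i) / 68 ∧ (x - 65 - 34 * i) / 68 ≤ 10 ∧
           x ≤ 100 + 68 * ((x - 65 - 34 * i) / 68) + 34 * i + 32 ∧
           x > 100 + 68 * ((x - 65 - 34 * i) / 68) + 34 * i - 32) then
        some (i, (x - 65 - 34 * i) / 68)
      else none) := by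
  have hr : PySem.List.pyRange 0 11 1 = [0,1,2,3,4,5,6,7,8,9,10] := by decide
  have hq1 : 68 * ((x - 65 - 34 * i) / 68) ≤ x - 65 - 34 * i := by omega
  have hq2 : x - 65 - 34 * i < 68 * ((x - 65 - 34 * i) / 68) + 68 := by omega
  rw [hr]
  by_cases hb : (90 + 59 * i - 32 < y ∧ y ≤ 90 + 59 * i + 32) ∧
      (0 ≤ (x - 65 - 34 * i) / 68 ∧ (x - 65 - 34 * i) / 68 ≤ 10 ∧
       x ≤ 100 + 68 * ((x - 65 - 34 * i) / 68) + 34 * i + 32 ∧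
       x > 100 + 68 * ((x - 65 - 34 * i) / 68) + 34 * i - 32)
  · rw [if_pos hb]
    refine pvLoopJ_some x y i _ hq1 hq2 _ ?_ ⟨by omega, by omega, by omega, by omega⟩
    simp only [List.mem_cons, List.not_mem_nil, or_false]
    omega
  · rw [if_neg hb]
    refine pvLoopJ_none x y i _ ?_
    intro j hj hcj
    simp only [List.mem_cons, List.not_mem_nil, or_false] at hj
    exact hb ⟨⟨by omega, by omega⟩, by omega, by omega, by omega, by omega⟩

theorem pvLoop_eq (x y : Int) (is : List Int) :
    pvLoopI x y is = pvLoopIAlt x y is := by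
  induction is with
  | nil => rfl
  | cons i is ih =>
    have hfd : PySem.Int.floordiv (x - 65 - 34 * i) 68 = (x - 65 - 34 * i) / 68 :=
      PySem.Int.floordiv_eq_ediv_of_pos (by norm_num)
    rw [pvLoopI.eq_2, pvInner_eq, pvLoopIAlt.eq_2, hfd]
    by_cases hb : 90 + 59 * i - 32 < y ∧ y ≤ 90 + 59 * i + 32
    · by_cases hd : 0 ≤ (x - 65 - 34 * i) / 68 ∧ (x - 65 - 34 * i) / 68 ≤ 10 ∧
          x ≤ 100 + 68 * ((x - 65 - 34 * i) / 68) + 34 * i + 32 ∧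
          x > 100 + 68 * ((x - 65 - 34 * i) / 68) + 34 * i - 32
      · rw [if_pos ⟨hb, hd⟩, if_pos hb, if_pos hd]
      · rw [if_neg (fun h => hd h.2), if_pos hb, if_neg hd, ih]
    · rw [if_neg (fun h => hb h.1), if_neg hb, ih]

-- ===== VERDICT (by name: the statement is the Claim_ definition above) =====
theorem coordinate_transform_pixel2map_spec : Claim_equal_coordinate_transform_pixel2map := by
  intro x y _
  unfold Spec_coordinate_transform_pixel2map coordinate_transform_pixel2map coordinate_transform_pixel2map_alt
  rw [pvLoop_eq]
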